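-- pv_equiv track=rewrite | github.com/rubenlucas93/RL-Studio | rl_studio/envs/carla/utils/perceptions_quadratic.py | discard_not_confident_centers
-- ===== SOURCE A (Python) =====
-- from collections import Counter
--
-- NO_DETECTED = 0
--
-- def discard_not_confident_centers(center_lane_indexes):
--     # Count the occurrences of each list size leaving out of the equation the non-detected
--     size_counter = Counter(len(inner_list) for inner_list in center_lane_indexes if NO_DETECTED not in inner_list)
--     # Check if size_counter is empty, which mean no centers found
--     if not size_counter:
--         return center_lane_indexes
--     # Find the most frequent size
--     # most_frequent_size = max(size_counter, key=size_counter.get)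
--
--     # Iterate over inner lists and set elements to 1 if the size doesn't match majority
--     result = []
--     for inner_list in center_lane_indexes:
--         # if len(inner_list) != most_frequent_size:
--         if len(inner_list) < 1 or inner_list[0] < 0 or inner_list[0]>600: # If we don't see the 2 lanes, we discard the row
--             inner_list = [NO_DETECTED] * len(inner_list)  # Set all elements to 1
--         result.append(inner_list)
--
--     return result
-- ===== SOURCE B (Python) =====
-- NO_DETECTED = 0
--
-- def discard_not_confident_centers(center_lane_indexes):
--     # Single pass: merge the "any confident row exists" check into the rewrite loop.
--     found_valid = False
--     result = []
--     for inner_list in center_lane_indexes: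
--         if NO_DETECTED not in inner_list:
--             found_valid = True
--         if len(inner_list) < 1 or inner_list[0] < 0 or inner_list[0] > 600:
--             result.append([NO_DETECTED] * len(inner_list))
--         else:
--             result.append(inner_list)
--     return result if found_valid else center_lane_indexes
-- ===== Notes on version B (the rewrite author's own statement) =====
-- stated objective: simpler
-- what changed: Replaced A's separate Counter-building pass (used only as a non-emptiness test) plus rewrite loop by one single pass that maintains a found_valid flag while building the rewritten result, returning the original list when no confident row exists.
import Mathlib
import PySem

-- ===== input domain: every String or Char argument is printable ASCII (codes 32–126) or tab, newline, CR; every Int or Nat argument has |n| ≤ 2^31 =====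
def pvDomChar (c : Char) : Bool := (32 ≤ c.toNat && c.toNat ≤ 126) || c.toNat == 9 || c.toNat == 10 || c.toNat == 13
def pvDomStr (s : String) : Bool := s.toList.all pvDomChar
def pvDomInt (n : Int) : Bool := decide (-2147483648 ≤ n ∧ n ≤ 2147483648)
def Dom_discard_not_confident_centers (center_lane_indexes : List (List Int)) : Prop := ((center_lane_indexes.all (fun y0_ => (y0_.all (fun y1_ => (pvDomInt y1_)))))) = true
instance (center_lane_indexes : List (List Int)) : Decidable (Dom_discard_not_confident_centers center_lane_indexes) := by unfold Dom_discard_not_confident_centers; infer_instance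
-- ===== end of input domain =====

-- B merges A's Counter pass (used only as a non-emptiness test) and the rewrite loop
-- into one pass with a boolean flag; return value equivalence, no mutation involved.

-- ===== PORT A =====
def discard_not_confident_centers (center_lane_indexes : List (List Int)) : List (List Int) :=
  -- Counter(len(inner) for inner in xs if NO_DETECTED not in inner)
  let size_counter : PySem.Dict Nat Int :=
    PySem.Dict.counter
      ((center_lane_indexes.filter (fun inner => decide ((0:Int) ∉ inner))).map (·.length))
  if size_counter.items = [] then center_lane_indexes
  else
    -- result = []; for inner in xs: if cond: inner = [0]*len(inner); result.append(inner)
    center_lane_indexes.foldl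
      (fun result inner =>
        result ++ [if inner.length < 1 ∨ inner.headI < 0 ∨ inner.headI > 600
                   then List.replicate inner.length (0:Int) else inner]) []
      -- inner.headI is Python's inner_list[0]: only reached when inner.length ≥ 1

-- ===== PORT B =====
def discard_not_confident_centers_alt (center_lane_indexes : List (List Int)) : List (List Int) :=
  -- one pass: (found_valid, result) accumulator
  let p := center_lane_indexes.foldl
    (fun (acc : Bool × List (List Int)) inner =>
      (acc.1 || decide ((0:Int) ∉ inner),
       acc.2 ++ [if inner.length < 1 ∨ inner.headI < 0 ∨ inner.headI > 600
                 then List.replicate inner.length (0:Int) else inner]))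
    (false, [])
  if p.1 then p.2 else center_lane_indexes

-- ===== PRECONDITION & SPEC =====
def Spec_discard_not_confident_centers (center_lane_indexes : List (List Int)) (out : List (List Int)) : Prop := out = discard_not_confident_centers_alt center_lane_indexes
instance (center_lane_indexes : List (List Int)) (out : List (List Int)) : Decidable (Spec_discard_not_confident_centers center_lane_indexes out) := by unfold Spec_discard_not_confident_centers; infer_instance

-- ===== CLAIM (what is proved, stated in full; the proofs are below) =====
def Claim_equal_discard_not_confident_centers : Prop := ∀ (center_lane_indexes : List (List Int)), Dom_discard_not_confident_centers center_lane_indexes → Spec_discard_not_confident_centers center_lane_indexes (discard_not_confident_centers center_lane_indexes)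

-- ===== LEMMAS AND PROOFS =====

-- characterisation of B's single-pass fold: flag = any confident row, result = map rewrite
theorem pv_alt_fold_char (xs : List (List Int)) (acc : Bool × List (List Int)) :
    xs.foldl
      (fun (acc : Bool × List (List Int)) inner =>
        (acc.1 || decide ((0:Int) ∉ inner),
         acc.2 ++ [if inner.length < 1 ∨ inner.headI < 0 ∨ inner.headI > 600
                   then List.replicate inner.length (0:Int) else inner]))
      acc
    = (acc.1 || xs.any (fun inner => decide ((0:Int) ∉ inner)),
       acc.2 ++ xs.map (fun inner =>
         if inner.length < 1 ∨ inner.headI < 0 ∨ inner.headI > 600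
         then List.replicate inner.length (0:Int) else inner)) := by
  induction xs generalizing acc with
  | nil => simp
  | cons h t ih =>
    rw [List.foldl_cons, ih]
    simp [Bool.or_assoc]

-- a Counter over a nonempty list has nonempty items
theorem pv_counter_items_nil (ys : List Nat) :
    (PySem.Dict.counter ys).items = [] ↔ ys = [] := by
  cases ys with
  | nil => simp [PySem.Dict.counter, PySem.Dict.empty]
  | cons y t =>
    constructor
    · intro h
      have hy : y ∈ PySem.Set.ofList (y :: t) := by
        rw [PySem.Set.mem_ofList]; exact List.mem_cons_self
      have := PySem.Dict.items_counter (xs := y :: t)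
      rw [h] at this
      have := (List.map_eq_nil_iff).mp this.symm
      rw [this] at hy
      simp at hy
    · intro h; cases h

theorem discard_equiv (xs : List (List Int)) :
    discard_not_confident_centers xs = discard_not_confident_centers_alt xs := by
  unfold discard_not_confident_centers discard_not_confident_centers_alt
  rw [pv_alt_fold_char]
  simp only [List.nil_append, Bool.false_or]
  by_cases h : xs.any (fun inner => decide ((0:Int) ∉ inner)) = true
  · have hfil : xs.filter (fun inner => decide ((0:Int) ∉ inner)) ≠ [] := by
      intro hf
      rcases List.any_eq_true.mp h with ⟨a, ha, hpa⟩
      have : a ∈ xs.filter (fun inner => decide ((0:Int) ∉ inner)) :=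
        List.mem_filter.mpr ⟨ha, hpa⟩
      rw [hf] at this; simp at this
    have hitems : ¬ ((PySem.Dict.counter
        ((xs.filter (fun inner => decide ((0:Int) ∉ inner))).map (·.length))).items = []) := by
      rw [pv_counter_items_nil]
      intro hm
      exact hfil ((List.map_eq_nil_iff).mp hm)
    rw [if_neg hitems, if_pos h,
        PySem.List.foldl_append_singleton_eq_map, List.nil_append]
  · have hfil : xs.filter (fun inner => decide ((0:Int) ∉ inner)) = [] := by
      rw [List.filter_eq_nil_iff]
      intro a ha
      rw [Bool.not_eq_true]
      cases hpa : (fun inner => decide ((0:Int) ∉ inner)) a with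
      | false => exact hpa
      | true => exact absurd (List.any_eq_true.mpr ⟨a, ha, hpa⟩) h
    have hitems : (PySem.Dict.counter
        ((xs.filter (fun inner => decide ((0:Int) ∉ inner))).map (·.length))).items = [] := by
      rw [pv_counter_items_nil, hfil]; rfl
    rw [if_pos hitems, if_neg h]

-- ===== VERDICT (by name: the statement is the Claim_ definition above) =====
theorem discard_not_confident_centers_spec : Claim_equal_discard_not_confident_centers := by
  intro xs _
  unfold Spec_discard_not_confident_centers
  exact discard_equiv xs
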